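-- pv_equiv track=rewrite | github.com/wistoff/retroshare | docker/app/merger.py | _is_save_file
-- ===== SOURCE A (Python) =====
-- _SAVE_EXTENSIONS = (".srm", ".sav", ".state")
--
-- def _is_save_file(filename):
--     """True if filename is a save file (.srm / .sav / .state / .stateN / .state.auto)."""
--     for ext in _SAVE_EXTENSIONS:
--         idx = filename.rfind(ext)
--         if idx <= 0:
--             continue
--         tail = filename[idx + len(ext):]
--         if tail == "" or tail.isdigit() or tail == ".auto":
--             return True
--     return False
-- ===== SOURCE B (Python) =====
-- _SAVE_EXTENSIONS = (".srm", ".sav", ".state")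
--
-- def _is_save_file(filename):
--     """True if filename is a save file (.srm / .sav / .state / .stateN / .state.auto)."""
--     if filename.endswith(".auto"):
--         stem = filename[:-5]
--     else:
--         stem = filename
--         while stem and stem[-1].isdigit():
--             stem = stem[:-1]
--     for ext in _SAVE_EXTENSIONS:
--         if len(ext) < len(stem) and stem.endswith(ext):
--             return True
--     return False
-- ===== Notes on version B (the rewrite author's own statement) =====
-- stated objective: simpler
-- what changed: A runs rfind per extension and classifies the tail after the last occurrence; B normalizes the filename once (drop a trailing '.auto', otherwise strip trailing digits) and then just checks whether the stem ends in one of the three extensions.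
import Mathlib
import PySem

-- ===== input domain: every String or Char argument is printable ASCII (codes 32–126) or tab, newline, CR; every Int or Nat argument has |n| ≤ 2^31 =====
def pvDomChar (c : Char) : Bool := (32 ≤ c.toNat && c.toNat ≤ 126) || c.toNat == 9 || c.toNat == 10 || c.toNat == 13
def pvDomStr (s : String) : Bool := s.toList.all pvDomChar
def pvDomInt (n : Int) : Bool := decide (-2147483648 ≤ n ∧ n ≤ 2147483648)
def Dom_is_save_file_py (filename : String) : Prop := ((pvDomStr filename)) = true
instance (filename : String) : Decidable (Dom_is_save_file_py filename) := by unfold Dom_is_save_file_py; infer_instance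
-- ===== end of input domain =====

-- B replaces A's per-extension rfind + tail classification by one suffix normalization
-- (drop a trailing ".auto", else strip trailing digits) followed by a plain endswith check (objective: simpler).

-- ===== PORT A =====
-- literal port of A's for-loop over _SAVE_EXTENSIONS
def isSaveExtLoopA (filename : String) : List String → Bool
  | [] => false
  | ext :: rest =>
    let idx := PySem.Str.rfind filename ext
    if idx ≤ 0 then isSaveExtLoopA filename rest
    else
      let tail := PySem.Str.slice filename (some (idx + PySem.Str.len ext)) none
      if tail == "" || PySem.Str.strIsdigit tail || tail == ".auto" then true
      else isSaveExtLoopA filename rest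

def is_save_file_py (filename : String) : Bool :=
  isSaveExtLoopA filename [".srm", ".sav", ".state"]

-- ===== PORT B =====
-- port of B's while loop 'while stem and stem[-1].isdigit(): stem = stem[:-1]'
def stripTrailingDigits (s : List Char) : List Char :=
  if h : s ≠ [] then
    if PySem.Chars.isdigit (s.getLast h) then stripTrailingDigits s.dropLast else s
  else s
termination_by s.length
decreasing_by
  have : 0 < s.length := List.length_pos_iff.mpr h
  simp [List.length_dropLast]; omega

def is_save_file_py_alt (filename : String) : Bool :=
  let stem : List Char :=
    if PySem.Str.endswith filename ".auto" then
      PySem.List.slice filename.toList none (some (-5))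
    else stripTrailingDigits filename.toList
  [".srm", ".sav", ".state"].any fun ext =>
    decide (ext.toList.length < stem.length) && PySem.Chars.endswith stem ext.toList

-- ===== PRECONDITION & SPEC =====
def Spec_is_save_file_py (filename : String) (out : Bool) : Prop := out = is_save_file_py_alt filename
instance (filename : String) (out : Bool) : Decidable (Spec_is_save_file_py filename out) := by unfold Spec_is_save_file_py; infer_instance

-- ===== CLAIM (what is proved, stated in full; the proofs are below) =====
def Claim_equal_is_save_file_py : Prop := ∀ (filename : String), Dom_is_save_file_py filename → Spec_is_save_file_py filename (is_save_file_py filename)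

-- ===== LEMMAS AND PROOFS =====

-- PySem.Chars.rfind.go s sub k returns the highest j ≤ k with sub a prefix of s.drop j, else -1
theorem rfind_go_cases (s sub : List Char) (k : ℕ) :
    (PySem.Chars.rfind.go s sub k = -1 ∧ ∀ j ≤ k, ¬ sub <+: s.drop j) ∨
    (∃ j : ℕ, PySem.Chars.rfind.go s sub k = (j : ℤ) ∧ j ≤ k ∧ sub <+: s.drop j ∧
      ∀ i : ℕ, j < i → i ≤ k → ¬ sub <+: s.drop i) := by
  induction k with
  | zero =>
    by_cases h : sub.isPrefixOf s
    · right
      exact ⟨0, by simp [PySem.Chars.rfind.go, h], le_refl 0,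
        by simpa [List.isPrefixOf_iff_prefix] using h, by omega⟩
    · left
      refine ⟨by simp [PySem.Chars.rfind.go, h], ?_⟩
      intro j hj
      interval_cases j
      simpa [List.isPrefixOf_iff_prefix] using h
  | succ n ih =>
    by_cases h : sub.isPrefixOf (s.drop (n+1))
    · right
      exact ⟨n+1, by simp [PySem.Chars.rfind.go, h], le_refl _,
        by simpa [List.isPrefixOf_iff_prefix] using h, by omega⟩
    · have hgo : PySem.Chars.rfind.go s sub (n+1) = PySem.Chars.rfind.go s sub n := by
        simp [PySem.Chars.rfind.go, h]
      have hnp : ¬ sub <+: s.drop (n+1) := by simpa [List.isPrefixOf_iff_prefix] using h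
      rcases ih with ⟨h1, h2⟩ | ⟨j, h1, h2, h3, h4⟩
      · left
        refine ⟨hgo.trans h1, ?_⟩
        intro j hj
        rcases Nat.lt_or_ge j (n+1) with hlt | hge
        · exact h2 j (by omega)
        · have : j = n+1 := by omega
          subst this; exact hnp
      · right
        refine ⟨j, hgo.trans h1, by omega, h3, ?_⟩
        intro i hji hik
        rcases Nat.lt_or_ge i (n+1) with hlt | hge
        · exact h4 i hji (by omega)
        · have : i = n+1 := by omega
          subst this; exact hnp

theorem rfind_eq_of (s sub : List Char) (j : ℕ) (hjk : j ≤ s.length)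
    (hj : sub <+: s.drop j) (hmax : ∀ i : ℕ, j < i → ¬ sub <+: s.drop i) :
    PySem.Chars.rfind s sub = (j : ℤ) := by
  unfold PySem.Chars.rfind
  rcases rfind_go_cases s sub s.length with ⟨h1, h2⟩ | ⟨j', h1, h2, h3, h4⟩
  · exact absurd hj (h2 j hjk)
  · rw [h1]
    norm_cast
    rcases Nat.lt_trichotomy j j' with h | h | h
    · exact absurd h3 (hmax j' h)
    · omega
    · exact absurd hj (h4 j h hjk)

theorem rfind_pos_decomp (s sub : List Char) (hsub : sub ≠ []) (h : 0 < PySem.Chars.rfind s sub) :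
    ∃ j : ℕ, PySem.Chars.rfind s sub = (j : ℤ) ∧ 0 < j ∧ sub <+: s.drop j ∧
      ∀ i : ℕ, j < i → ¬ sub <+: s.drop i := by
  unfold PySem.Chars.rfind at *
  rcases rfind_go_cases s sub s.length with ⟨h1, _⟩ | ⟨j, h1, h2, h3, h4⟩
  · rw [h1] at h; omega
  · refine ⟨j, h1, by rw [h1] at h; exact_mod_cast h, h3, ?_⟩
    intro i hji hp
    by_cases hle : i ≤ s.length
    · exact h4 i hji hle hp
    · have hnil : s.drop i = [] := List.drop_eq_nil_of_le (by omega)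
      rw [hnil] at hp
      exact hsub (List.prefix_nil.mp hp)

theorem strip_nil : stripTrailingDigits [] = [] := by
  rw [stripTrailingDigits]; simp

theorem strip_concat (xs : List Char) (c : Char) :
    stripTrailingDigits (xs ++ [c]) =
      if PySem.Chars.isdigit c then stripTrailingDigits xs else xs ++ [c] := by
  rw [stripTrailingDigits]
  simp

theorem strip_decomp (l : List Char) :
    ∃ ds, l = stripTrailingDigits l ++ ds ∧ ∀ c ∈ ds, PySem.Chars.isdigit c = true := by
  induction l using List.reverseRecOn with
  | nil => exact ⟨[], by simp [strip_nil], by simp⟩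
  | append_singleton xs c ih =>
    rw [strip_concat]
    by_cases h : PySem.Chars.isdigit c
    · rcases ih with ⟨ds, h1, h2⟩
      refine ⟨ds ++ [c], ?_, ?_⟩
      · simp [h, ← List.append_assoc, ← h1]
      · intro d hd
        rcases List.mem_append.mp hd with hd | hd
        · exact h2 d hd
        · simp at hd; subst hd; exact h
    · exact ⟨[], by simp [h], by simp⟩

theorem strip_append (xs ds : List Char) (hds : ∀ c ∈ ds, PySem.Chars.isdigit c = true)
    (hx : ∀ c, xs.getLast? = some c → PySem.Chars.isdigit c = false) :
    stripTrailingDigits (xs ++ ds) = xs := by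
  induction ds using List.reverseRecOn with
  | nil =>
    simp only [List.append_nil]
    cases hxs : xs.eq_nil_or_concat with
    | inl h => subst h; exact strip_nil
    | inr h =>
      rcases h with ⟨ys, c, rfl⟩
      rw [List.concat_eq_append, strip_concat, if_neg]
      intro hc
      have := hx c (by simp)
      simp [hc] at this
  | append_singleton ds' d ih =>
    rw [← List.append_assoc, strip_concat, if_pos (hds d (by simp))]
    exact ih (fun c hc => hds c (by simp [hc]))

theorem drop_append_sub (p x : List Char) (i : ℕ) (h : p.length ≤ i) :
    (p ++ x).drop i = x.drop (i - p.length) := by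
  obtain ⟨m, rfl⟩ : ∃ m, i = p.length + m := ⟨i - p.length, by omega⟩
  simp [List.drop_append]

-- A's per-extension test, over char lists
def APred (l e : List Char) : Prop :=
  0 < PySem.Chars.rfind l e ∧
    (l.drop ((PySem.Chars.rfind l e).toNat + e.length) = [] ∨
     PySem.Chars.strIsdigit (l.drop ((PySem.Chars.rfind l e).toNat + e.length)) = true ∨
     l.drop ((PySem.Chars.rfind l e).toNat + e.length) = ".auto".toList)

-- B's normalized stem, over char lists
def stemOf (l : List Char) : List Char :=
  if PySem.Chars.endswith l ".auto".toList then l.take (l.length - 5)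
  else stripTrailingDigits l

-- the central per-extension equivalence
theorem key_iff (l e et : List Char) (hee : e = '.' :: et) (hdot : '.' ∉ et)
    (hdig : ∀ c ∈ e, PySem.Chars.isdigit c = false)
    (h2 : ∀ d : ℕ, 0 < d → d ≤ 5 → ¬ e <+: (e ++ ".auto".toList).drop d)
    (hsuf1 : ¬ (".auto".toList <:+ e)) (hsuf2 : ¬ (e <:+ ".auto".toList)) :
    APred l e ↔ (e.length < (stemOf l).length ∧ e <:+ stemOf l) := by
  have hene : e ≠ [] := by simp [hee]
  have hauto5 : (".auto".toList).length = 5 := by decide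
  have hautone : (".auto".toList) ≠ [] := by decide
  constructor
  · rintro ⟨hr, htail⟩
    obtain ⟨j, hrj, hj0, hpre, hmax⟩ := rfind_pos_decomp l e hene hr
    obtain ⟨t, ht⟩ := hpre
    have hjle : j ≤ l.length := by
      by_contra hc
      have hnil : l.drop j = [] := List.drop_eq_nil_of_le (by omega)
      rw [hnil] at ht
      exact hene (List.append_eq_nil_iff.mp ht).1
    have hl : l = l.take j ++ (e ++ t) := by
      have h0 := (List.take_append_drop j l).symm
      rw [← ht] at h0
      exact h0
    have hlenj : (l.take j).length = j := by simp [hjle]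
    have htt : l.drop (j + e.length) = t := by
      have hsplit : l.drop (j + e.length) = (l.drop j).drop e.length := by
        rw [List.drop_drop, Nat.add_comm]
      rw [hsplit, ← ht, List.drop_left]
    have hrn : (PySem.Chars.rfind l e).toNat = j := by rw [hrj]; simp
    rw [hrn, htt] at htail
    have hllen : l.length = j + e.length + t.length := by
      conv_lhs => rw [hl]
      simp [hlenj]; omega
    rcases htail with h0 | hd | ha
    · -- tail empty
      subst h0
      have hl' : l = l.take j ++ e := by simpa using hl
      have hesuf : e <:+ l := ⟨l.take j, hl'.symm⟩
      have hnotauto : ¬ PySem.Chars.endswith l ".auto".toList = true := by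
        rw [PySem.Chars.endswith_iff]
        intro ha
        rcases List.suffix_or_suffix_of_suffix ha hesuf with h | h
        · exact hsuf1 h
        · exact hsuf2 h
      have hstrip : stripTrailingDigits (l.take j ++ e) = l.take j ++ e := by
        have := strip_append (l.take j ++ e) [] (by simp)
          (fun c hc => by
            rw [List.getLast?_append_of_ne_nil _ hene] at hc
            exact hdig c (List.mem_of_getLast? hc))
        simpa using this
      have hstem : stemOf l = l.take j ++ e := by
        rw [stemOf, if_neg hnotauto]
        conv_lhs => rw [hl']
        exact hstrip
      rw [hstem]
      exact ⟨by simp [hlenj]; omega, ⟨l.take j, rfl⟩⟩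
    · -- tail a nonempty run of digits
      have htne : t ≠ [] := by
        intro h; rw [h] at hd; simp [PySem.Chars.strIsdigit] at hd
      have htdig : ∀ c ∈ t, PySem.Chars.isdigit c = true := by
        intro c hc
        have hd' := hd
        simp only [PySem.Chars.strIsdigit, Bool.and_eq_true, List.all_eq_true] at hd'
        exact hd'.2 c hc
      have hnotauto : ¬ PySem.Chars.endswith l ".auto".toList = true := by
        rw [PySem.Chars.endswith_iff]
        rintro ⟨p, hp⟩
        have h1 : l.getLast? = some 'o' := by
          rw [← hp, List.getLast?_append_of_ne_nil _ hautone]; decide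
        have h2' : l.getLast? = t.getLast? := by
          conv_lhs => rw [hl]
          rw [List.getLast?_append_of_ne_nil _ (by simp [htne]),
              List.getLast?_append_of_ne_nil _ htne]
        rw [h1] at h2'
        have := htdig 'o' (List.mem_of_getLast? h2'.symm)
        simp [PySem.Chars.isdigit] at this
      have hstem : stemOf l = l.take j ++ e := by
        rw [stemOf, if_neg hnotauto]
        conv_lhs => rw [hl, ← List.append_assoc]
        exact strip_append _ _ htdig
          (fun c hc => by
            rw [List.getLast?_append_of_ne_nil _ hene] at hc
            exact hdig c (List.mem_of_getLast? hc))
      rw [hstem]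
      exact ⟨by simp [hlenj]; omega, ⟨l.take j, rfl⟩⟩
    · -- tail = ".auto"
      have hasuf : PySem.Chars.endswith l ".auto".toList = true := by
        rw [PySem.Chars.endswith_iff]
        refine ⟨l.take j ++ e, ?_⟩
        rw [List.append_assoc, ← ha]
        exact hl.symm
      have hstem : stemOf l = l.take j ++ e := by
        rw [stemOf, if_pos hasuf]
        have hlen5 : l.length - 5 = j + e.length := by
          rw [hllen, ha, hauto5]; omega
        rw [hlen5]
        conv_lhs => rw [hl, ← List.append_assoc]
        rw [List.take_left' (by simp [hlenj])]
      rw [hstem]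
      exact ⟨by simp [hlenj]; omega, ⟨l.take j, rfl⟩⟩
  · rintro ⟨hlen, p, hp⟩
    by_cases hauto : PySem.Chars.endswith l ".auto".toList = true
    · have hstem : stemOf l = l.take (l.length - 5) := by rw [stemOf, if_pos hauto]
      rw [PySem.Chars.endswith_iff] at hauto
      obtain ⟨q, hq⟩ := hauto
      have hq5 : l.length = q.length + 5 := by rw [← hq]; simp
      have hqs : l.take (l.length - 5) = q := by
        rw [show l.length - 5 = q.length from by omega, ← hq, List.take_left]
      have hqe : q = p ++ e := by rw [← hqs, ← hstem, ← hp]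
      have hle : l = p ++ (e ++ ".auto".toList) := by
        rw [← hq, hqe, List.append_assoc]
      have hstemlen : (stemOf l).length = p.length + e.length := by
        rw [← hp]; simp
      have hj0 : 0 < p.length := by rw [hstemlen] at hlen; omega
      have hrf : PySem.Chars.rfind l e = (p.length : ℤ) := by
        apply rfind_eq_of
        · rw [hle]; simp
        · rw [hle, List.drop_left]; exact ⟨".auto".toList, rfl⟩
        · intro i hi
          rw [hle, drop_append_sub _ _ _ (by omega)]
          set d := i - p.length with hd
          have hd1 : 0 < d := by omega
          by_cases hd5 : d ≤ 5
          · exact h2 d hd1 hd5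
          · intro hpre
            have hlen' := hpre.length_le
            simp at hlen'
            have : e.length ≠ 0 := by simpa using hene
            omega
      refine ⟨by rw [hrf]; exact_mod_cast hj0, ?_⟩
      right; right
      rw [hrf, show ((p.length : ℤ)).toNat = p.length from by simp]
      rw [hle, show p.length + e.length = (p ++ e).length from by simp,
          ← List.append_assoc, List.drop_left]
    · have hstem : stemOf l = stripTrailingDigits l := by rw [stemOf, if_neg hauto]
      obtain ⟨ds, hds, hdsall⟩ := strip_decomp l
      have hle : l = p ++ (e ++ ds) := by
        conv_lhs => rw [hds, ← hstem, ← hp]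
        rw [List.append_assoc]
      have hstemlen : (stemOf l).length = p.length + e.length := by rw [← hp]; simp
      have hj0 : 0 < p.length := by rw [hstemlen] at hlen; omega
      have hnodot : ∀ c ∈ et ++ ds, c ≠ '.' := by
        intro c hc
        rcases List.mem_append.mp hc with h | h
        · intro h'; subst h'; exact hdot h
        · intro h'; subst h'
          have := hdsall _ h
          simp [PySem.Chars.isdigit] at this
      have hrf : PySem.Chars.rfind l e = (p.length : ℤ) := by
        apply rfind_eq_of
        · rw [hle]; simp
        · rw [hle, List.drop_left]; exact ⟨ds, rfl⟩
        · intro i hi hpre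
          rw [hle, drop_append_sub _ _ _ (by omega)] at hpre
          obtain ⟨m, hm⟩ : ∃ m, i - p.length = m + 1 := ⟨i - p.length - 1, by omega⟩
          rw [hm, hee, show ('.' :: et) ++ ds = '.' :: (et ++ ds) from rfl,
              List.drop_succ_cons] at hpre
          rcases hpre with ⟨t', ht'⟩
          have hdotmem : '.' ∈ (et ++ ds).drop m := by
            rw [← ht']; simp
          exact hnodot '.' (List.mem_of_mem_drop hdotmem) rfl
      refine ⟨by rw [hrf]; exact_mod_cast hj0, ?_⟩
      rw [hrf, show ((p.length : ℤ)).toNat = p.length from by simp]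
      rw [hle, show p.length + e.length = (p ++ e).length from by simp,
          ← List.append_assoc, List.drop_left]
      by_cases hdse : ds = []
      · left; exact hdse
      · right; left
        simp [PySem.Chars.strIsdigit, hdse]
        exact fun c hc => hdsall c hc

theorem endswith_true_iff (s p : List Char) : PySem.Chars.endswith s p = true ↔ p <:+ s :=
  List.isSuffixOf_iff_suffix

theorem ofList_eq_iff (xs : List Char) (s : String) : String.ofList xs = s ↔ xs = s.toList := by
  constructor
  · intro h; rw [← h]; simp
  · intro h; subst h; simp

-- the tail test of A's loop, moved to char lists
set_option maxHeartbeats 1000000 in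
theorem tail_iff (f ext : String) (hpos : 0 < PySem.Chars.rfind f.toList ext.toList) :
    ((PySem.Str.slice f (some (PySem.Str.rfind f ext + PySem.Str.len ext)) none == "")
      || PySem.Str.strIsdigit (PySem.Str.slice f (some (PySem.Str.rfind f ext + PySem.Str.len ext)) none)
      || (PySem.Str.slice f (some (PySem.Str.rfind f ext + PySem.Str.len ext)) none == ".auto")) = true
    ↔ (f.toList.drop ((PySem.Chars.rfind f.toList ext.toList).toNat + ext.toList.length) = [] ∨
       PySem.Chars.strIsdigit (f.toList.drop ((PySem.Chars.rfind f.toList ext.toList).toNat + ext.toList.length)) = true ∨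
       f.toList.drop ((PySem.Chars.rfind f.toList ext.toList).toNat + ext.toList.length) = ".auto".toList) := by
  have e1 : PySem.Str.rfind f ext = PySem.Chars.rfind f.toList ext.toList := rfl
  have e2 : PySem.Str.len ext = (ext.toList.length : ℤ) := rfl
  have hidx : (0:ℤ) ≤ PySem.Str.rfind f ext + PySem.Str.len ext := by rw [e1, e2]; omega
  have htoNat : (PySem.Str.rfind f ext + PySem.Str.len ext).toNat
      = (PySem.Chars.rfind f.toList ext.toList).toNat + ext.toList.length := by
    rw [e1, e2]; omega
  simp only [PySem.Str.strIsdigit, PySem.Str.slice, PySem.Chars.slice_eq_listSlice,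
    PySem.List.slice_from _ hidx, htoNat, String.toList_ofList, Bool.or_eq_true, beq_iff_eq,
    ofList_eq_iff, show ("" : String).toList = [] from rfl]
  tauto

theorem loopA_iff (f : String) (exts : List String) :
    isSaveExtLoopA f exts = true ↔ ∃ ext ∈ exts, APred f.toList ext.toList := by
  induction exts with
  | nil => simp [isSaveExtLoopA]
  | cons ext rest ih =>
    rw [isSaveExtLoopA]
    by_cases h : PySem.Str.rfind f ext ≤ 0
    · rw [if_pos h]
      simp only [ih, List.mem_cons]
      constructor
      · rintro ⟨e', h1, h2⟩; exact ⟨e', Or.inr h1, h2⟩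
      · rintro ⟨e', h1 | h1, h2⟩
        · subst h1
          exact absurd h2.1 (by simpa using h)
        · exact ⟨e', h1, h2⟩
    · rw [if_neg h]
      have hpos : 0 < PySem.Chars.rfind f.toList ext.toList :=
        show (0:ℤ) < PySem.Str.rfind f ext from not_le.mp h
      by_cases hc : (PySem.Str.slice f (some (PySem.Str.rfind f ext + PySem.Str.len ext)) none == ""
          || PySem.Str.strIsdigit (PySem.Str.slice f (some (PySem.Str.rfind f ext + PySem.Str.len ext)) none)
          || PySem.Str.slice f (some (PySem.Str.rfind f ext + PySem.Str.len ext)) none == ".auto") = true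
      · rw [if_pos hc]
        simp only [true_iff]
        exact ⟨ext, List.mem_cons_self, hpos, (tail_iff f ext hpos).mp hc⟩
      · rw [if_neg hc]
        simp only [ih, List.mem_cons]
        constructor
        · rintro ⟨e', h1, h2⟩; exact ⟨e', Or.inr h1, h2⟩
        · rintro ⟨e', h1 | h1, h2⟩
          · subst h1
            exact absurd ((tail_iff f e' h2.1).mpr h2.2) hc
          · exact ⟨e', h1, h2⟩

theorem altB_iff (f : String) :
    is_save_file_py_alt f = true ↔
      ∃ ext ∈ ([".srm", ".sav", ".state"] : List String),
        ext.toList.length < (stemOf f.toList).length ∧ ext.toList <:+ stemOf f.toList := by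
  have hstem : (if PySem.Str.endswith f ".auto" then
        PySem.List.slice f.toList none (some (-5))
      else stripTrailingDigits f.toList) = stemOf f.toList := by
    rw [stemOf]
    by_cases h : PySem.Chars.endswith f.toList ".auto".toList = true
    · rw [if_pos h, if_pos (show PySem.Str.endswith f ".auto" = true from h),
        PySem.List.slice_to_neg_ofNat f.toList 5 (by omega)]
    · rw [if_neg h, if_neg (show ¬ PySem.Str.endswith f ".auto" = true from h)]
  rw [is_save_file_py_alt]
  simp only [hstem, List.any_eq_true, Bool.and_eq_true, decide_eq_true_eq]
  constructor
  · rintro ⟨ext, h1, h2, h3⟩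
    exact ⟨ext, h1, h2, (endswith_true_iff _ _).mp h3⟩
  · rintro ⟨ext, h1, h2, h3⟩
    exact ⟨ext, h1, h2, (endswith_true_iff _ _).mpr h3⟩

-- ===== VERDICT (by name: the statement is the Claim_ definition above) =====
theorem is_save_file_py_spec : Claim_equal_is_save_file_py := by
  intro f _
  unfold Spec_is_save_file_py
  have key : ∀ ext ∈ ([".srm", ".sav", ".state"] : List String),
      (APred f.toList ext.toList ↔
        (ext.toList.length < (stemOf f.toList).length ∧ ext.toList <:+ stemOf f.toList)) := by
    intro ext hmem
    simp only [List.mem_cons, List.not_mem_nil, or_false] at hmem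
    rcases hmem with rfl | rfl | rfl
    · rw [show (".srm").toList = ['.','s','r','m'] from rfl]
      exact key_iff _ _ ['s','r','m'] rfl (by decide) (by intro c hc; fin_cases hc <;> rfl)
        (by intro d h1 h5; interval_cases d <;> decide) (by decide) (by decide)
    · rw [show (".sav").toList = ['.','s','a','v'] from rfl]
      exact key_iff _ _ ['s','a','v'] rfl (by decide) (by intro c hc; fin_cases hc <;> rfl)
        (by intro d h1 h5; interval_cases d <;> decide) (by decide) (by decide)
    · rw [show (".state").toList = ['.','s','t','a','t','e'] from rfl]
      exact key_iff _ _ ['s','t','a','t','e'] rfl (by decide) (by intro c hc; fin_cases hc <;> rfl)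
        (by intro d h1 h5; interval_cases d <;> decide) (by decide) (by decide)
  have h : is_save_file_py f = true ↔ is_save_file_py_alt f = true := by
    rw [show is_save_file_py f = isSaveExtLoopA f [".srm", ".sav", ".state"] from rfl,
        loopA_iff, altB_iff]
    constructor
    · rintro ⟨ext, hmem, hp⟩
      exact ⟨ext, hmem, (key ext hmem).mp hp⟩
    · rintro ⟨ext, hmem, hp⟩
      exact ⟨ext, hmem, (key ext hmem).mpr hp⟩
  cases hA : is_save_file_py f <;> cases hB : is_save_file_py_alt f <;> simp_all
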